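-- pv_equiv track=rewrite | github.com/MatthewGrim/Lunar_SPS | general_functions.py | combine_events
-- ===== SOURCE A (Python) =====
-- def combine_events(events_1, events_2):
--     """
--     Takes two event dicts containing start and end events and compines them into a single list of events.
--
--     :param events_1: dict of first events
--     :param events_2: dict of second events
--     :return:
--     """
--     assert len(events_1["Start"]) == len(events_1["End"])
--     assert len(events_2["Start"]) == len(events_2["End"])
--     new_event_list = dict()
--     new_event_list["Start"] = list()
--     new_event_list["End"] = list()
--
--     idx_1 = 0
--     idx_2 = 0
--     while idx_1 < len(events_1["Start"]) and idx_2 < len(events_2["Start"]):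
--         start_1 = events_1["Start"]
--         end_1 = events_1["End"]
--         start_2 = events_2["Start"]
--         end_2 = events_2["End"]
--
--         if idx_1 >= len(events_1["Start"]) and idx_2 < len(events_2["Start"]):
--             new_event_list["Start"] = start_2
--             new_event_list["End"] = end_2
--
--             idx_2 += 1
--             continue
--         if idx_2 >= len(events_2["Start"]):
--             new_event_list["Start"] = start_1
--             new_event_list["End"] = end_1
--
--             idx_1 += 1
--             continue
--
--         if start_1 < end_1 < start_2 < end_2:
--             # First event happens before second event with no overlap
--             new_event_list["Start"] = start_1
--             new_event_list["End"] = end_1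
--
--             idx_1 += 1
--         elif start_2 < end_2 < start_1 < end_1:
--             # Second event happens before first event with no overlap
--             new_event_list["Start"] = start_2
--             new_event_list["End"] = end_2
--
--             idx_2 += 1
--         elif start_1 < start_2 < end_2 < end_1:
--             # First event contains second event
--             new_event_list["Start"] = start_1
--             new_event_list["End"] = end_1
--
--             idx_1 += 1
--             idx_2 += 1
--         elif start_2 < start_1 < end_1 < end_2:
--             # Second event contains first event
--             new_event_list["Start"] = start_2
--             new_event_list["End"] = end_2
--
--             idx_1 += 1
--             idx_2 += 1
--         elif start_1 < start_2 < end_1 < end_2: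
--             # Events overlap starting at first, and ending in second
--             new_event_list["Start"] = start_1
--             new_event_list["End"] = end_2
--
--             idx_1 += 1
--             idx_2 += 1
--         elif start_2 < start_1 < end_2 < end_1:
--             # Events overlap starting at second, and ending in second
--             new_event_list["Start"] = start_2
--             new_event_list["End"] = end_1
--
--             idx_1 += 1
--             idx_2 += 1
--         else:
--             raise RuntimeError("Shouldn't be possible to get here!")
--
--     return new_event_list
-- ===== SOURCE B (Python) =====
-- def combine_events(events_1, events_2):
--     """Closed form: the loop's branch condition never changes, so evaluate it once."""
--     assert len(events_1["Start"]) == len(events_1["End"])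
--     assert len(events_2["Start"]) == len(events_2["End"])
--     s1, e1 = events_1["Start"], events_1["End"]
--     s2, e2 = events_2["Start"], events_2["End"]
--     if not s1 or not s2:
--         return {"Start": [], "End": []}
--     if s1 < e1 < s2 < e2:
--         return {"Start": s1, "End": e1}
--     if s2 < e2 < s1 < e1:
--         return {"Start": s2, "End": e2}
--     if s1 < s2 < e2 < e1:
--         return {"Start": s1, "End": e1}
--     if s2 < s1 < e1 < e2:
--         return {"Start": s2, "End": e2}
--     if s1 < s2 < e1 < e2:
--         return {"Start": s1, "End": e2}
--     if s2 < s1 < e2 < e1: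
--         return {"Start": s2, "End": e1}
--     raise RuntimeError("Shouldn't be possible to get here!")
-- ===== Notes on version B (the rewrite author's own statement) =====
-- stated objective: simpler
-- what changed: The while-loop's branch condition is loop-invariant (it compares the whole lists, never elements), so B replaces the loop with a single evaluation of the same six comparison chains, returning the matching result dict directly.
import Mathlib
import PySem

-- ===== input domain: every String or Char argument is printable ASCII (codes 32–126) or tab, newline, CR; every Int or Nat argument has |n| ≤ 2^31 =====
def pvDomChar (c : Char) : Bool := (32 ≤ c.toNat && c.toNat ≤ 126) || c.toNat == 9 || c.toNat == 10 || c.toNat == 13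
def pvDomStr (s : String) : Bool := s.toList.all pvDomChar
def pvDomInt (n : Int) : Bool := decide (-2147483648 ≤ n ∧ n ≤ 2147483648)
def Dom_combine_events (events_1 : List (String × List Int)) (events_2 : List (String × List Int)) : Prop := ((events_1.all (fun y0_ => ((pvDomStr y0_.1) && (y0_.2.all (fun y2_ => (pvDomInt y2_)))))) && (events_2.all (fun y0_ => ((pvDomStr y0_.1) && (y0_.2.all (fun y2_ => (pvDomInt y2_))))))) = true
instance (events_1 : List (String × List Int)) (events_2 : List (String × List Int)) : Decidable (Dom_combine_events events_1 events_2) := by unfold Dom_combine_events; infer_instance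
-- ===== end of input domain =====

-- B replaces A's while-loop (whose branch condition is loop-invariant) by a single evaluation
-- of the same six comparison chains; objective: simpler.


-- Python's `<` on list[int]: lexicographic (exact hand port; PySem has no list `<`)
def pyListLt : List Int → List Int → Bool
  | [], [] => false
  | [], _ :: _ => true
  | _ :: _, [] => false
  | a :: as_, b :: bs => if a < b then true else if b < a then false else pyListLt as_ bs

-- events["Start"] / events["End"]; KeyError is excluded by Pre_ (getD default never observed)
def evGet (d : List (String × List Int)) (k : String) : List Int := (d.lookup k).getD []

-- ===== PORT A =====
-- the while-loop; new_event_list has exactly the keys "Start","End" (inserted first, only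
-- ever overwritten), so it is carried as its two entries (curS, curE); RuntimeError branch
-- (all six chains false) is excluded by Pre_ and returns the current dict here.
def loopA (s1 t1 s2 t2 : List Int) (idx1 idx2 : Nat) (curS curE : List Int) : List Int × List Int :=
  if h : idx1 < s1.length ∧ idx2 < s2.length then
    if h1 : idx1 ≥ s1.length ∧ idx2 < s2.length then
      loopA s1 t1 s2 t2 idx1 (idx2 + 1) s2 t2
    else if h2 : idx2 ≥ s2.length then
      loopA s1 t1 s2 t2 (idx1 + 1) idx2 s1 t1
    else if pyListLt s1 t1 && pyListLt t1 s2 && pyListLt s2 t2 then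
      loopA s1 t1 s2 t2 (idx1 + 1) idx2 s1 t1
    else if pyListLt s2 t2 && pyListLt t2 s1 && pyListLt s1 t1 then
      loopA s1 t1 s2 t2 idx1 (idx2 + 1) s2 t2
    else if pyListLt s1 s2 && pyListLt s2 t2 && pyListLt t2 t1 then
      loopA s1 t1 s2 t2 (idx1 + 1) (idx2 + 1) s1 t1
    else if pyListLt s2 s1 && pyListLt s1 t1 && pyListLt t1 t2 then
      loopA s1 t1 s2 t2 (idx1 + 1) (idx2 + 1) s2 t2
    else if pyListLt s1 s2 && pyListLt s2 t1 && pyListLt t1 t2 then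
      loopA s1 t1 s2 t2 (idx1 + 1) (idx2 + 1) s1 t2
    else if pyListLt s2 s1 && pyListLt s1 t2 && pyListLt t2 t1 then
      loopA s1 t1 s2 t2 (idx1 + 1) (idx2 + 1) s2 t1
    else
      (curS, curE)  -- raise RuntimeError: excluded by Pre_
  else (curS, curE)
termination_by (s1.length - idx1) + (s2.length - idx2)
decreasing_by all_goals omega

def combine_events (events_1 : List (String × List Int)) (events_2 : List (String × List Int)) : List (String × List Int) :=
  -- asserts (len Start = len End) and KeyError are excluded by Pre_
  let r := loopA (evGet events_1 "Start") (evGet events_1 "End")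
                 (evGet events_2 "Start") (evGet events_2 "End") 0 0 [] []
  [("Start", r.1), ("End", r.2)]

-- ===== PORT B =====
def combine_events_alt (events_1 : List (String × List Int)) (events_2 : List (String × List Int)) : List (String × List Int) :=
  let s1 := evGet events_1 "Start"
  let t1 := evGet events_1 "End"
  let s2 := evGet events_2 "Start"
  let t2 := evGet events_2 "End"
  if s1 = [] ∨ s2 = [] then [("Start", ([] : List Int)), ("End", ([] : List Int))]
  else if pyListLt s1 t1 && pyListLt t1 s2 && pyListLt s2 t2 then [("Start", s1), ("End", t1)]
  else if pyListLt s2 t2 && pyListLt t2 s1 && pyListLt s1 t1 then [("Start", s2), ("End", t2)]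
  else if pyListLt s1 s2 && pyListLt s2 t2 && pyListLt t2 t1 then [("Start", s1), ("End", t1)]
  else if pyListLt s2 s1 && pyListLt s1 t1 && pyListLt t1 t2 then [("Start", s2), ("End", t2)]
  else if pyListLt s1 s2 && pyListLt s2 t1 && pyListLt t1 t2 then [("Start", s1), ("End", t2)]
  else if pyListLt s2 s1 && pyListLt s1 t2 && pyListLt t2 t1 then [("Start", s2), ("End", t1)]
  else [("Start", ([] : List Int)), ("End", ([] : List Int))]  -- raise RuntimeError: excluded by Pre_

-- ===== PRECONDITION & SPEC =====
-- Pre_ excludes exactly the inputs where the Python raises: a missing "Start"/"End" key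
-- (KeyError), unequal Start/End lengths (AssertionError), and the RuntimeError branch
-- (both Start lists nonempty but none of the six comparison chains holds).
def Pre_combine_events (events_1 : List (String × List Int)) (events_2 : List (String × List Int)) : Prop :=
  (events_1.lookup "Start").isSome = true ∧ (events_1.lookup "End").isSome = true ∧
  (events_2.lookup "Start").isSome = true ∧ (events_2.lookup "End").isSome = true ∧
  (evGet events_1 "Start").length = (evGet events_1 "End").length ∧
  (evGet events_2 "Start").length = (evGet events_2 "End").length ∧
  (evGet events_1 "Start" = [] ∨ evGet events_2 "Start" = [] ∨
    ((evGet events_1 "Start" < evGet events_1 "End" ∧ evGet events_1 "End" < evGet events_2 "Start" ∧ evGet events_2 "Start" < evGet events_2 "End") ∨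
     (evGet events_2 "Start" < evGet events_2 "End" ∧ evGet events_2 "End" < evGet events_1 "Start" ∧ evGet events_1 "Start" < evGet events_1 "End") ∨
     (evGet events_1 "Start" < evGet events_2 "Start" ∧ evGet events_2 "Start" < evGet events_2 "End" ∧ evGet events_2 "End" < evGet events_1 "End") ∨
     (evGet events_2 "Start" < evGet events_1 "Start" ∧ evGet events_1 "Start" < evGet events_1 "End" ∧ evGet events_1 "End" < evGet events_2 "End") ∨
     (evGet events_1 "Start" < evGet events_2 "Start" ∧ evGet events_2 "Start" < evGet events_1 "End" ∧ evGet events_1 "End" < evGet events_2 "End") ∨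
     (evGet events_2 "Start" < evGet events_1 "Start" ∧ evGet events_1 "Start" < evGet events_2 "End" ∧ evGet events_2 "End" < evGet events_1 "End")))
instance (events_1 : List (String × List Int)) (events_2 : List (String × List Int)) : Decidable (Pre_combine_events events_1 events_2) := by unfold Pre_combine_events; infer_instance

def pvWitness_combine_events : (List (String × List Int)) × (List (String × List Int)) :=
  ([("Start", [0]), ("End", [1])], [("Start", [2]), ("End", [3])])

def Spec_combine_events (events_1 : List (String × List Int)) (events_2 : List (String × List Int)) (out : List (String × List Int)) : Prop := out = combine_events_alt events_1 events_2
instance (events_1 : List (String × List Int)) (events_2 : List (String × List Int)) (out : List (String × List Int)) : Decidable (Spec_combine_events events_1 events_2 out) := by unfold Spec_combine_events; infer_instance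

-- ===== CLAIM (what is proved, stated in full; the proofs are below) =====
def Claim_equal_combine_events : Prop := ∀ (events_1 : List (String × List Int)) (events_2 : List (String × List Int)), Dom_combine_events events_1 events_2 → Pre_combine_events events_1 events_2 → Spec_combine_events events_1 events_2 (combine_events events_1 events_2)

-- ===== LEMMAS AND PROOFS =====

-- Python's list `<` is Lean's lexicographic `<` on List Int
theorem pyListLt_iff (xs ys : List Int) : pyListLt xs ys = true ↔ xs < ys := by
  induction xs generalizing ys with
  | nil => cases ys <;> simp [pyListLt]
  | cons a as ih =>
    cases ys with
    | nil => simp [pyListLt]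
    | cons b bs =>
      rw [List.cons_lt_cons_iff]
      simp only [pyListLt]
      split_ifs with h1 h2
      · simp [h1]
      · simp; omega
      · have hab : a = b := le_antisymm (not_lt.1 h2) (not_lt.1 h1)
        simp [hab, ih]

-- the if-chain of the loop body, as a function of the four (loop-invariant) lists
def loopTarget (s1 t1 s2 t2 : List Int) : List Int × List Int :=
  if pyListLt s1 t1 && pyListLt t1 s2 && pyListLt s2 t2 then (s1, t1)
  else if pyListLt s2 t2 && pyListLt t2 s1 && pyListLt s1 t1 then (s2, t2)
  else if pyListLt s1 s2 && pyListLt s2 t2 && pyListLt t2 t1 then (s1, t1)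
  else if pyListLt s2 s1 && pyListLt s1 t1 && pyListLt t1 t2 then (s2, t2)
  else if pyListLt s1 s2 && pyListLt s2 t1 && pyListLt t1 t2 then (s1, t2)
  else (s2, t1)

theorem loopA_eval (s1 t1 s2 t2 : List Int)
    (hb : ((pyListLt s1 t1 && pyListLt t1 s2 && pyListLt s2 t2) ||
           (pyListLt s2 t2 && pyListLt t2 s1 && pyListLt s1 t1) ||
           (pyListLt s1 s2 && pyListLt s2 t2 && pyListLt t2 t1) ||
           (pyListLt s2 s1 && pyListLt s1 t1 && pyListLt t1 t2) ||
           (pyListLt s1 s2 && pyListLt s2 t1 && pyListLt t1 t2) ||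
           (pyListLt s2 s1 && pyListLt s1 t2 && pyListLt t2 t1)) = true) :
    ∀ (idx1 idx2 : Nat) (curS curE : List Int),
      loopA s1 t1 s2 t2 idx1 idx2 curS curE =
        if idx1 < s1.length ∧ idx2 < s2.length then loopTarget s1 t1 s2 t2 else (curS, curE) := by
  intro idx1 idx2 curS curE
  fun_induction loopA s1 t1 s2 t2 idx1 idx2 curS curE with
  | case1 idx1 idx2 curS curE h h1 ih => omega
  | case2 idx1 idx2 curS curE h h1 h2 ih => omega
  | case3 idx1 idx2 curS curE h h1 h2 hc ih =>
      rw [if_pos h, ih]; simp [loopTarget, hc]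
  | case4 idx1 idx2 curS curE h h1 h2 hc1 hc ih =>
      rw [if_pos h, ih]; rw [Bool.not_eq_true] at hc1; simp [loopTarget, hc1, hc]
  | case5 idx1 idx2 curS curE h h1 h2 hc1 hc2 hc ih =>
      rw [if_pos h, ih]; rw [Bool.not_eq_true] at hc1 hc2; simp [loopTarget, hc1, hc2, hc]
  | case6 idx1 idx2 curS curE h h1 h2 hc1 hc2 hc3 hc ih =>
      rw [if_pos h, ih]; rw [Bool.not_eq_true] at hc1 hc2 hc3; simp [loopTarget, hc1, hc2, hc3, hc]
  | case7 idx1 idx2 curS curE h h1 h2 hc1 hc2 hc3 hc4 hc ih =>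
      rw [if_pos h, ih]; rw [Bool.not_eq_true] at hc1 hc2 hc3 hc4; simp [loopTarget, hc1, hc2, hc3, hc4, hc]
  | case8 idx1 idx2 curS curE h h1 h2 hc1 hc2 hc3 hc4 hc5 hc ih =>
      rw [if_pos h, ih]; rw [Bool.not_eq_true] at hc1 hc2 hc3 hc4 hc5; simp [loopTarget, hc1, hc2, hc3, hc4, hc5]
  | case9 idx1 idx2 curS curE h h1 h2 hc1 hc2 hc3 hc4 hc5 hc6 =>
      rw [Bool.not_eq_true] at hc1 hc2 hc3 hc4 hc5 hc6
      simp [hc1, hc2, hc3, hc4, hc5, hc6] at hb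
  | case10 idx1 idx2 curS curE h => rw [if_neg h]

theorem loopA_stop (s1 t1 s2 t2 : List Int) (idx1 idx2 : Nat) (curS curE : List Int)
    (h : ¬ (idx1 < s1.length ∧ idx2 < s2.length)) :
    loopA s1 t1 s2 t2 idx1 idx2 curS curE = (curS, curE) := by
  rw [loopA, dif_neg h]

-- ===== VERDICT (by name: the statement is the Claim_ definition above) =====
theorem combine_events_spec : Claim_equal_combine_events := by
  intro e1 e2 _hdom hpre
  obtain ⟨-, -, -, -, -, -, hlast⟩ := hpre
  unfold Spec_combine_events
  by_cases hs1 : evGet e1 "Start" = []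
  · simp only [combine_events, combine_events_alt]
    rw [loopA_stop _ _ _ _ _ _ _ _ (by simp [hs1])]
    simp [hs1]
  · by_cases hs2 : evGet e2 "Start" = []
    · simp only [combine_events, combine_events_alt]
      rw [loopA_stop _ _ _ _ _ _ _ _ (by simp [hs2])]
      simp [hs2]
    · have hb := hlast.resolve_left hs1 |>.resolve_left hs2
      have hb' : ((pyListLt (evGet e1 "Start") (evGet e1 "End") && pyListLt (evGet e1 "End") (evGet e2 "Start") && pyListLt (evGet e2 "Start") (evGet e2 "End")) ||
           (pyListLt (evGet e2 "Start") (evGet e2 "End") && pyListLt (evGet e2 "End") (evGet e1 "Start") && pyListLt (evGet e1 "Start") (evGet e1 "End")) ||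
           (pyListLt (evGet e1 "Start") (evGet e2 "Start") && pyListLt (evGet e2 "Start") (evGet e2 "End") && pyListLt (evGet e2 "End") (evGet e1 "End")) ||
           (pyListLt (evGet e2 "Start") (evGet e1 "Start") && pyListLt (evGet e1 "Start") (evGet e1 "End") && pyListLt (evGet e1 "End") (evGet e2 "End")) ||
           (pyListLt (evGet e1 "Start") (evGet e2 "Start") && pyListLt (evGet e2 "Start") (evGet e1 "End") && pyListLt (evGet e1 "End") (evGet e2 "End")) ||
           (pyListLt (evGet e2 "Start") (evGet e1 "Start") && pyListLt (evGet e1 "Start") (evGet e2 "End") && pyListLt (evGet e2 "End") (evGet e1 "End"))) = true := by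
        simp only [Bool.or_eq_true, Bool.and_eq_true, pyListLt_iff, and_assoc, or_assoc]
        exact hb
      simp only [combine_events, combine_events_alt]
      rw [loopA_eval _ _ _ _ hb',
          if_pos ⟨List.length_pos_of_ne_nil hs1, List.length_pos_of_ne_nil hs2⟩,
          if_neg (by simp [hs1, hs2])]
      simp only [loopTarget]
      split_ifs <;> first | rfl | simp_all
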